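-- pv_equiv track=rewrite | github.com/NineMeen/Cisco-Web-application-Network-Automation | app.py | parse_dhcp_pools
-- ===== SOURCE A (Python) =====
-- def parse_dhcp_pools(config_output):
--     pools = []
--     current_pool = None
--     for line in config_output.split('\n'):
--         line = line.strip()
--         if line.startswith('ip dhcp pool'):
--             if current_pool:
--                 pools.append(current_pool)
--             current_pool = {'name': line.split()[-1], 'network': '', 'subnet': '', 'default_router': '', 'dns_server': '', 'domain_name': '', 'lease_time': ''}
--         elif current_pool:
--             if line.startswith('network'):
--                 parts = line.split()
--                 current_pool['network'] = parts[1]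
--                 current_pool['subnet'] = parts[2]
--             elif line.startswith('default-router'):
--                 current_pool['default_router'] = line.split()[-1]
--             elif line.startswith('dns-server'):
--                 current_pool['dns_server'] = line.split()[-1]
--             elif line.startswith('domain-name'):
--                 current_pool['domain_name'] = line.split()[-1]
--             elif line.startswith('lease'):
--                 current_pool['lease_time'] = ' '.join(line.split()[1:])
--     if current_pool:
--         pools.append(current_pool)
--     return pools
-- ===== SOURCE B (Python) =====
-- def _blocks(lines):
--     """Partition stripped lines into (header, body) blocks; lines before the first header are dropped."""
--     blocks = []
--     i = 0
--     while i < len(lines) and not lines[i].startswith('ip dhcp pool'):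
--         i += 1
--     while i < len(lines):
--         header = lines[i]
--         j = i + 1
--         while j < len(lines) and not lines[j].startswith('ip dhcp pool'):
--             j += 1
--         blocks.append((header, lines[i + 1:j]))
--         i = j
--     return blocks
--
--
-- def _parse_pool_block(header, body):
--     pool = {'name': header.split()[-1], 'network': '', 'subnet': '', 'default_router': '', 'dns_server': '', 'domain_name': '', 'lease_time': ''}
--     for line in body:
--         if line.startswith('network'):
--             parts = line.split()
--             pool['network'] = parts[1]
--             pool['subnet'] = parts[2]
--         elif line.startswith('default-router'):
--             pool['default_router'] = line.split()[-1]
--         elif line.startswith('dns-server'):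
--             pool['dns_server'] = line.split()[-1]
--         elif line.startswith('domain-name'):
--             pool['domain_name'] = line.split()[-1]
--         elif line.startswith('lease'):
--             pool['lease_time'] = ' '.join(line.split()[1:])
--     return pool
--
--
-- def parse_dhcp_pools(config_output):
--     stripped = [line.strip() for line in config_output.split('\n')]
--     return [_parse_pool_block(h, b) for h, b in _blocks(stripped)]
-- ===== Notes on version B (the rewrite author's own statement) =====
-- stated objective: alternative
-- what changed: A interleaves block detection and field parsing in one stateful loop with an optional current-pool accumulator; B first partitions the stripped lines into (header, body) blocks and then maps a standalone parse-one-block function over them.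
import Mathlib
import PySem

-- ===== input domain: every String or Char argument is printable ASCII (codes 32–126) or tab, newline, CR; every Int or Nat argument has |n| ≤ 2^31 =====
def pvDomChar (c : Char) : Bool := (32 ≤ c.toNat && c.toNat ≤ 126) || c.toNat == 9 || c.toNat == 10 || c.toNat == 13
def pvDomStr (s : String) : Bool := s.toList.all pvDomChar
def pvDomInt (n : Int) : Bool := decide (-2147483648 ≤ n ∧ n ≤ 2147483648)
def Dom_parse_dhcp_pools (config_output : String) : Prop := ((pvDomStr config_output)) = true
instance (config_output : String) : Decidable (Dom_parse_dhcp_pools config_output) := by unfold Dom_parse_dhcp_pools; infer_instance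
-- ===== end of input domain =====

-- B replaces A's single stateful loop (optional current-pool accumulator) by partitioning the
-- stripped lines into (header, body) blocks and mapping a standalone parse-one-block function
-- over them: same cost, different decomposition (objective: alternative).

-- ===== PORT A =====
-- fresh pool dict: {'name': line.split()[-1], 'network': '', ...}
def pvInitPoolA (line : String) : PySem.Dict String String :=
  PySem.Dict.ofList [("name", (PySem.List.pyGet? (PySem.Str.split₀ line) (-1)).getD ""),
    ("network", ""), ("subnet", ""), ("default_router", ""), ("dns_server", ""),
    ("domain_name", ""), ("lease_time", "")]

-- the elif chain updating current_pool on one (already stripped) non-header line.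
-- On a 'network' line with fewer than 3 tokens BOTH Pythons (A and B) raise the same
-- IndexError at parts[1]/parts[2]; both ports use the same .getD "" default exactly there,
-- so the proved equality of the ports matches the Pythons wherever either returns.
def pvStepPoolA (d : PySem.Dict String String) (line : String) : PySem.Dict String String :=
  if PySem.Str.startswith line "network" then
    let parts := PySem.Str.split₀ line
    (d.insert "network" ((PySem.List.pyGet? parts 1).getD "")).insert "subnet"
      ((PySem.List.pyGet? parts 2).getD "")
  else if PySem.Str.startswith line "default-router" then
    d.insert "default_router" ((PySem.List.pyGet? (PySem.Str.split₀ line) (-1)).getD "")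
  else if PySem.Str.startswith line "dns-server" then
    d.insert "dns_server" ((PySem.List.pyGet? (PySem.Str.split₀ line) (-1)).getD "")
  else if PySem.Str.startswith line "domain-name" then
    d.insert "domain_name" ((PySem.List.pyGet? (PySem.Str.split₀ line) (-1)).getD "")
  else if PySem.Str.startswith line "lease" then
    d.insert "lease_time" (PySem.Str.join " " (PySem.List.slice (PySem.Str.split₀ line) (some 1) none))
  else d

-- loop body on the stripped line (A strips at the top of each iteration)
def pvStepA' (st : List (PySem.Dict String String) × Option (PySem.Dict String String))
    (line : String) : List (PySem.Dict String String) × Option (PySem.Dict String String) :=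
  if PySem.Str.startswith line "ip dhcp pool" then
    ((match st.2 with | some d => st.1 ++ [d] | none => st.1), some (pvInitPoolA line))
  else
    match st.2 with
    | some d => (st.1, some (pvStepPoolA d line))
    | none => st

def pvStepA (st : List (PySem.Dict String String) × Option (PySem.Dict String String))
    (rawline : String) : List (PySem.Dict String String) × Option (PySem.Dict String String) :=
  pvStepA' st (PySem.Str.strip rawline)

def parse_dhcp_pools (config_output : String) : List (List (String × String)) :=
  let st := (((PySem.Str.split? config_output "\n").getD [])).foldl pvStepA ([], none)
  (match st.2 with | some d => st.1 ++ [d] | none => st.1).map (fun d => PySem.Dict.items d)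

-- ===== PORT B =====
def pvIsHeader (line : String) : Bool := PySem.Str.startswith line "ip dhcp pool"

-- _blocks: partition stripped lines into (header, body) blocks; the index scans of Source B are
-- the takeWhile/dropWhile of the non-header prefix.
def pvBlocks : List String → List (String × List String)
  | [] => []
  | l :: ls =>
    if pvIsHeader l then
      (l, ls.takeWhile (fun x => !pvIsHeader x)) :: pvBlocks (ls.dropWhile (fun x => !pvIsHeader x))
    else pvBlocks ls
  termination_by ls => ls.length
  decreasing_by
  · exact Nat.lt_succ_of_le (List.length_dropWhile_le _ _)
  · exact Nat.lt_succ_self _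

def pvInitPoolB (header : String) : PySem.Dict String String :=
  PySem.Dict.ofList [("name", (PySem.List.pyGet? (PySem.Str.split₀ header) (-1)).getD ""),
    ("network", ""), ("subnet", ""), ("default_router", ""), ("dns_server", ""),
    ("domain_name", ""), ("lease_time", "")]

def pvStepPoolB (d : PySem.Dict String String) (line : String) : PySem.Dict String String :=
  if PySem.Str.startswith line "network" then
    let parts := PySem.Str.split₀ line
    (d.insert "network" ((PySem.List.pyGet? parts 1).getD "")).insert "subnet"
      ((PySem.List.pyGet? parts 2).getD "")
  else if PySem.Str.startswith line "default-router" then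
    d.insert "default_router" ((PySem.List.pyGet? (PySem.Str.split₀ line) (-1)).getD "")
  else if PySem.Str.startswith line "dns-server" then
    d.insert "dns_server" ((PySem.List.pyGet? (PySem.Str.split₀ line) (-1)).getD "")
  else if PySem.Str.startswith line "domain-name" then
    d.insert "domain_name" ((PySem.List.pyGet? (PySem.Str.split₀ line) (-1)).getD "")
  else if PySem.Str.startswith line "lease" then
    d.insert "lease_time" (PySem.Str.join " " (PySem.List.slice (PySem.Str.split₀ line) (some 1) none))
  else d

def pvParsePoolBlock (header : String) (body : List String) : PySem.Dict String String :=
  body.foldl pvStepPoolB (pvInitPoolB header)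

def parse_dhcp_pools_alt (config_output : String) : List (List (String × String)) :=
  let stripped := (((PySem.Str.split? config_output "\n").getD [])).map PySem.Str.strip
  (pvBlocks stripped).map (fun hb => (pvParsePoolBlock hb.1 hb.2).items)

-- ===== PRECONDITION & SPEC =====
def Spec_parse_dhcp_pools (config_output : String) (out : List (List (String × String))) : Prop := out = parse_dhcp_pools_alt config_output
instance (config_output : String) (out : List (List (String × String))) : Decidable (Spec_parse_dhcp_pools config_output out) := by unfold Spec_parse_dhcp_pools; infer_instance

-- ===== CLAIM (what is proved, stated in full; the proofs are below) =====
def Claim_equal_parse_dhcp_pools : Prop := ∀ (config_output : String), Dom_parse_dhcp_pools config_output → Spec_parse_dhcp_pools config_output (parse_dhcp_pools config_output)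

-- ===== LEMMAS AND PROOFS =====

-- the two per-line/per-header helpers are literally the same code
theorem pvStepPool_eq : pvStepPoolA = pvStepPoolB := rfl
theorem pvInitPool_eq : pvInitPoolA = pvInitPoolB := rfl

-- appending the pending pool at the end of A's loop
def pvFinish (st : List (PySem.Dict String String) × Option (PySem.Dict String String)) :
    List (PySem.Dict String String) :=
  match st.2 with | some d => st.1 ++ [d] | none => st.1

-- invariant while a pool is open: the rest of the current block is the non-header prefix
theorem pvLoop_some (ls : List String) :
    ∀ (pools : List (PySem.Dict String String)) (d : PySem.Dict String String),
    pvFinish (ls.foldl pvStepA' (pools, some d)) =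
      pools ++ ((ls.takeWhile (fun x => !pvIsHeader x)).foldl pvStepPoolA d
        :: (pvBlocks (ls.dropWhile (fun x => !pvIsHeader x))).map
             (fun hb => pvParsePoolBlock hb.1 hb.2)) := by
  induction ls with
  | nil => intro pools d; simp [pvFinish, pvBlocks]
  | cons l ls ih =>
    intro pools d
    by_cases h : pvIsHeader l = true
    · have hs : PySem.Str.startswith l "ip dhcp pool" = true := h
      simp only [List.foldl_cons, pvStepA', hs, if_pos]
      rw [ih (pools ++ [d]) (pvInitPoolA l)]
      simp [List.takeWhile, List.dropWhile, h, pvBlocks, pvParsePoolBlock,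
        ← pvStepPool_eq, ← pvInitPool_eq]
    · have hs : PySem.Str.startswith l "ip dhcp pool" = false := by
        simpa [pvIsHeader] using h
      simp only [List.foldl_cons, pvStepA', hs, Bool.false_eq_true, if_neg, not_false_iff]
      rw [ih pools (pvStepPoolA d l)]
      simp [List.takeWhile, List.dropWhile, h]

-- before the first header: lines are dropped, blocks of the tail are the blocks
theorem pvLoop_none (ls : List String) :
    ∀ (pools : List (PySem.Dict String String)),
    pvFinish (ls.foldl pvStepA' (pools, none)) =
      pools ++ (pvBlocks ls).map (fun hb => pvParsePoolBlock hb.1 hb.2) := by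
  induction ls with
  | nil => intro pools; simp [pvFinish, pvBlocks]
  | cons l ls ih =>
    intro pools
    by_cases h : pvIsHeader l = true
    · have hs : PySem.Str.startswith l "ip dhcp pool" = true := h
      simp only [List.foldl_cons, pvStepA', hs, if_pos]
      rw [pvLoop_some ls pools (pvInitPoolA l)]
      simp [pvBlocks, h, pvParsePoolBlock, ← pvStepPool_eq, ← pvInitPool_eq]
    · have hs : PySem.Str.startswith l "ip dhcp pool" = false := by
        simpa [pvIsHeader] using h
      simp only [List.foldl_cons, pvStepA', hs, Bool.false_eq_true, if_neg, not_false_iff]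
      rw [ih pools]
      simp [pvBlocks, h]

-- ===== VERDICT (by name: the statement is the Claim_ definition above) =====
theorem parse_dhcp_pools_spec : Claim_equal_parse_dhcp_pools := by
  intro config_output _
  unfold Spec_parse_dhcp_pools parse_dhcp_pools parse_dhcp_pools_alt
  show (pvFinish ((((PySem.Str.split? config_output "\n").getD [])).foldl pvStepA ([], none))).map
      (fun d => PySem.Dict.items d) = _
  have hmap : (((PySem.Str.split? config_output "\n").getD [])).foldl pvStepA ([], none) =
      ((((PySem.Str.split? config_output "\n").getD [])).map PySem.Str.strip).foldl pvStepA' ([], none) := by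
    rw [List.foldl_map]; rfl
  rw [hmap, pvLoop_none _ []]
  simp [List.map_map]
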